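-- pv_equiv track=rewrite | github.com/ArnoldTafataona/fragment | tests/old.fragment.03/fragment_256.py | pht_4x4
-- ===== SOURCE A (Python) =====
-- def add(x=int, y=int) -> int:
--     return (x + y) % pow(2, 32)
--
-- def pht_4x4(data: list, iterations: int = 4) -> list:
--     for _ in range(iterations):
--         data[0] = add(x=data[0], y=data[1])
--         data[1] = add(x=data[1], y=(2 * data[0]))
--         data[2] = add(x=data[2], y=data[3])
--         data[3] = add(x=data[3], y=(2 * data[2]))
--
--         data = [
--             data[1],
--             data[2],
--             data[3],
--             data[0],
--         ]
--
--     return data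
-- ===== SOURCE B (Python) =====
-- def pht_4x4(data: list, iterations: int = 4) -> list:
--     # Binary matrix exponentiation of the 4x4 linear map mod 2**32 (O(log iterations)).
--     # Return-value equivalent to A; A also mutates its argument list in place, B does not.
--     if iterations <= 0:
--         return data
--     M = 2 ** 32
--
--     def matmul(A, B):
--         return [[sum(A[i][k] * B[k][j] for k in range(4)) % M
--                  for j in range(4)] for i in range(4)]
--
--     P = [[2, 3, 0, 0], [0, 0, 1, 1], [0, 0, 2, 3], [1, 1, 0, 0]]
--     R = [[1, 0, 0, 0], [0, 1, 0, 0], [0, 0, 1, 0], [0, 0, 0, 1]]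
--     n = iterations
--     while n:
--         if n & 1:
--             R = matmul(R, P)
--         n >>= 1
--         P = matmul(P, P)
--     v = data[:4]
--     return [sum(R[i][k] * v[k] for k in range(4)) % M for i in range(4)]
-- ===== Notes on version B (the rewrite author's own statement) =====
-- stated objective: faster
-- what changed: B replaces A's per-iteration loop by binary exponentiation of the 4x4 transition matrix mod 2^32 and one matrix-vector product (A also mutates its argument list in place; B leaves it untouched, return values agree).
import Mathlib
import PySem

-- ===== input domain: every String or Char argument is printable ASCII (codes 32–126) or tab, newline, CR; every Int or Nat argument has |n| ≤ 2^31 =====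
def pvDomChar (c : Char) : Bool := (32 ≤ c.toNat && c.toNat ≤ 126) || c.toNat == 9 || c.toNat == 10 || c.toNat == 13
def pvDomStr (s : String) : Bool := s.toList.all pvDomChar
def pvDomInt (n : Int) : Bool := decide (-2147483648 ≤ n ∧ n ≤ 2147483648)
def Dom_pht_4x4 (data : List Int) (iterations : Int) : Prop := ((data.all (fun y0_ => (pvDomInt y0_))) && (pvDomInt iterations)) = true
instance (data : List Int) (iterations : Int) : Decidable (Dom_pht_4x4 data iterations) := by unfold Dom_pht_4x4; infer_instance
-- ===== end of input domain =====

-- B replaces A's per-iteration loop by binary exponentiation of the 4x4 transition matrix mod 2^32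
-- (O(log iterations) instead of O(iterations)). Return-value equivalence: the Python A also mutates
-- its argument list in place, B does not.

-- ===== PORT A =====
def pvM : Int := 4294967296  -- pow(2, 32)

-- def add(x, y): return (x + y) % pow(2, 32)
def pvAdd (x y : Int) : Int := (x + y) % pvM

-- one body of A's for-loop; Python's data[i] for literal i in range under Pre_, so getD is exact there
def pvStepA (data : List Int) : List Int :=
  let data := data.set 0 (pvAdd (data.getD 0 0) (data.getD 1 0))
  let data := data.set 1 (pvAdd (data.getD 1 0) (2 * data.getD 0 0))
  let data := data.set 2 (pvAdd (data.getD 2 0) (data.getD 3 0))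
  let data := data.set 3 (pvAdd (data.getD 3 0) (2 * data.getD 2 0))
  [data.getD 1 0, data.getD 2 0, data.getD 3 0, data.getD 0 0]

-- for _ in range(iterations): …   (range(iterations) runs iterations.toNat times)
def pvLoopA : Nat → List Int → List Int
  | 0, data => data
  | n + 1, data => pvLoopA n (pvStepA data)

def pht_4x4 (data : List Int) (iterations : Int) : List Int :=
  pvLoopA iterations.toNat data

-- ===== PORT B =====
-- A[i][j] on the well-formed 4x4 matrices B builds (in range, so getD is exact)
def pvG (A : List (List Int)) (i j : Nat) : Int := (A.getD i []).getD j 0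

-- matmul of Source B
def pvMatmul (A B : List (List Int)) : List (List Int) :=
  (List.range 4).map fun i => (List.range 4).map fun j =>
    (((List.range 4).map fun k => pvG A i k * pvG B k j).sum) % pvM

-- the while-loop of Source B: while n: (if n&1: R = R@P); n >>= 1; P = P@P
def pvPowLoop (n : Nat) (R P : List (List Int)) : List (List Int) :=
  if n = 0 then R
  else pvPowLoop (n / 2) (if n % 2 = 1 then pvMatmul R P else R) (pvMatmul P P)
termination_by n
decreasing_by omega

def pht_4x4_alt (data : List Int) (iterations : Int) : List Int :=
  if iterations ≤ 0 then data
  else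
    let P := [[2, 3, 0, 0], [0, 0, 1, 1], [0, 0, 2, 3], [1, 1, 0, 0]]
    let I := [[1, 0, 0, 0], [0, 1, 0, 0], [0, 0, 1, 0], [0, 0, 0, 1]]
    let R := pvPowLoop iterations.toNat I P
    let v := data.take 4  -- data[:4] with nonnegative literal bound is exactly take 4
    (List.range 4).map fun i =>
      (((List.range 4).map fun k => pvG R i k * v.getD k 0).sum) % pvM

-- ===== PRECONDITION & SPEC =====
-- Pre_ excludes only inputs where Python A raises IndexError: a positive iteration count
-- with fewer than 4 data elements.
def Pre_pht_4x4 (data : List Int) (iterations : Int) : Prop :=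
  iterations ≤ 0 ∨ 4 ≤ data.length
instance (data : List Int) (iterations : Int) : Decidable (Pre_pht_4x4 data iterations) := by
  unfold Pre_pht_4x4; infer_instance

def pvWitness_pht_4x4 : List Int × Int := ([1, 2, 3, 4], 4)

def Spec_pht_4x4 (data : List Int) (iterations : Int) (out : List Int) : Prop := out = pht_4x4_alt data iterations
instance (data : List Int) (iterations : Int) (out : List Int) : Decidable (Spec_pht_4x4 data iterations out) := by unfold Spec_pht_4x4; infer_instance

-- ===== CLAIM (what is proved, stated in full; the proofs are below) =====
def Claim_equal_pht_4x4 : Prop := ∀ (data : List Int) (iterations : Int), Dom_pht_4x4 data iterations → Pre_pht_4x4 data iterations → Spec_pht_4x4 data iterations (pht_4x4 data iterations)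

-- ===== LEMMAS AND PROOFS =====

-- work in ZMod 2^32
def pvPmatL : List (List Int) := [[2, 3, 0, 0], [0, 0, 1, 1], [0, 0, 2, 3], [1, 1, 0, 0]]
abbrev pvZM := ZMod 4294967296

theorem pv_castmod (x : Int) : ((x % pvM : Int) : pvZM) = (x : pvZM) := by
  have h : (pvM : Int) = ((4294967296 : ℕ) : ℤ) := by norm_num [pvM]
  rw [h, ZMod.intCast_mod]

def pvPhiM (A : List (List Int)) : Matrix (Fin 4) (Fin 4) pvZM :=
  Matrix.of fun i j => ((pvG A i j : Int) : pvZM)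

def pvPhiV (l : List Int) : Fin 4 → pvZM := fun i => ((l.getD i 0 : Int) : pvZM)

theorem pv_range4 : List.range 4 = [0, 1, 2, 3] := rfl

theorem pv_phiM_matmul (A B : List (List Int)) :
    pvPhiM (pvMatmul A B) = pvPhiM A * pvPhiM B := by
  ext i j
  fin_cases i <;> fin_cases j <;>
    · simp only [pvPhiM, pvMatmul, pvG, pv_range4, List.map, List.sum_cons, List.sum_nil,
        Matrix.mul_apply, Fin.sum_univ_four, Matrix.of_apply, List.getD, List.getElem?_cons_zero,
        List.getElem?_cons_succ, Option.getD_some, Fin.isValue, Fin.val_zero, Fin.val_one, Fin.val_two,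
        show ((3 : Fin 4) : Nat) = 3 from rfl]
      rw [pv_castmod]; push_cast; ring

theorem pv_phiM_pow (n : Nat) : ∀ R P : List (List Int),
    pvPhiM (pvPowLoop n R P) = pvPhiM R * (pvPhiM P) ^ n := by
  induction n using Nat.strong_induction_on with
  | _ n ih =>
    intro R P
    rw [pvPowLoop]
    by_cases h : n = 0
    · simp [h]
    · rw [if_neg h, ih (n / 2) (by omega), pv_phiM_matmul]
      by_cases hp : n % 2 = 1
      · rw [if_pos hp, pv_phiM_matmul, ← sq, ← pow_mul, mul_assoc, ← pow_succ',
          show 2 * (n / 2) + 1 = n from by omega]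
      · rw [if_neg hp, ← sq, ← pow_mul, show 2 * (n / 2) = n from by omega]

theorem pv_stepA_cons (a b c d : Int) (t : List Int) :
    pvStepA (a :: b :: c :: d :: t) =
      [(b + 2 * ((a + b) % pvM)) % pvM, (c + d) % pvM,
       (d + 2 * ((c + d) % pvM)) % pvM, (a + b) % pvM] := rfl

theorem pv_step_phi (a b c d : Int) (t : List Int) :
    pvPhiV (pvStepA (a :: b :: c :: d :: t)) =
      (pvPhiM pvPmatL).mulVec (pvPhiV (a :: b :: c :: d :: t)) := by
  funext i
  fin_cases i <;>
    · simp only [pv_stepA_cons, pvPhiV, pvPhiM, pvPmatL, pvG, Matrix.mulVec, dotProduct,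
        Fin.sum_univ_four, Matrix.of_apply, List.getD, List.getElem?_cons_zero,
        List.getElem?_cons_succ, Option.getD_some, Fin.isValue, Fin.val_zero, Fin.val_one, Fin.val_two,
        show ((3 : Fin 4) : Nat) = 3 from rfl]
      rw [pv_castmod]; push_cast [pv_castmod]; ring

theorem pvM_pos : (0 : Int) < pvM := by norm_num [pvM]

theorem pv_loopA_char (n : Nat) : ∀ (a b c d : Int) (t : List Int), 1 ≤ n →
    ∃ r0 r1 r2 r3 : Int,
      pvLoopA n (a :: b :: c :: d :: t) = [r0, r1, r2, r3] ∧
      (∀ x ∈ [r0, r1, r2, r3], 0 ≤ x ∧ x < pvM) ∧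
      pvPhiV [r0, r1, r2, r3] = ((pvPhiM pvPmatL) ^ n).mulVec (pvPhiV (a :: b :: c :: d :: t)) := by
  induction n with
  | zero => omega
  | succ n ih =>
    intro a b c d t _
    by_cases hn : n = 0
    · subst hn
      refine ⟨_, _, _, _, by rw [pvLoopA, pv_stepA_cons, pvLoopA], ?_, ?_⟩
      · intro x hx
        have h0 := pvM_pos
        simp only [List.mem_cons, List.not_mem_nil, or_false] at hx
        rcases hx with rfl | rfl | rfl | rfl <;>
          exact ⟨Int.emod_nonneg _ (by omega), Int.emod_lt_of_pos _ h0⟩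
      · rw [← pv_stepA_cons, pv_step_phi, pow_one]
    · have hstep : pvLoopA (n + 1) (a :: b :: c :: d :: t)
          = pvLoopA n (pvStepA (a :: b :: c :: d :: t)) := rfl
      rw [pv_stepA_cons] at hstep
      obtain ⟨r0, r1, r2, r3, heq, hrange, hphi⟩ :=
        ih ((b + 2 * ((a + b) % pvM)) % pvM) ((c + d) % pvM)
           ((d + 2 * ((c + d) % pvM)) % pvM) ((a + b) % pvM) [] (by omega)
      refine ⟨r0, r1, r2, r3, by rw [hstep]; exact heq, hrange, ?_⟩
      rw [hphi]
      have h4 : pvPhiV ((b + 2 * ((a + b) % pvM)) % pvM :: (c + d) % pvM ::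
            (d + 2 * ((c + d) % pvM)) % pvM :: (a + b) % pvM :: ([] : List Int))
          = (pvPhiM pvPmatL).mulVec (pvPhiV (a :: b :: c :: d :: t)) := by
        rw [← pv_stepA_cons a b c d t, pv_step_phi]
      rw [h4, Matrix.mulVec_mulVec, ← pow_succ]

theorem pv_phiM_one :
    pvPhiM [[1, 0, 0, 0], [0, 1, 0, 0], [0, 0, 1, 0], [0, 0, 0, 1]] = 1 := by
  ext i j
  fin_cases i <;> fin_cases j <;>
    simp [pvPhiM, pvG]

-- the alt output for positive iterations, on a destructured input
theorem pv_alt_char (a b c d : Int) (t : List Int) (iterations : Int) (hpos : 0 < iterations) :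
    ∃ o0 o1 o2 o3 : Int,
      pht_4x4_alt (a :: b :: c :: d :: t) iterations = [o0, o1, o2, o3] ∧
      (∀ x ∈ [o0, o1, o2, o3], 0 ≤ x ∧ x < pvM) ∧
      pvPhiV [o0, o1, o2, o3] =
        ((pvPhiM pvPmatL) ^ iterations.toNat).mulVec (pvPhiV (a :: b :: c :: d :: t)) := by
  rw [pht_4x4_alt, if_neg (by omega)]
  refine ⟨_, _, _, _, rfl, ?_, ?_⟩
  · intro x hx
    have h0 := pvM_pos
    simp only [List.mem_cons, List.not_mem_nil, or_false] at hx
    rcases hx with rfl | rfl | rfl | rfl <;>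
      exact ⟨Int.emod_nonneg _ (by omega), Int.emod_lt_of_pos _ h0⟩
  · have hRphi : pvPhiM (pvPowLoop iterations.toNat
        [[1, 0, 0, 0], [0, 1, 0, 0], [0, 0, 1, 0], [0, 0, 0, 1]]
        [[2, 3, 0, 0], [0, 0, 1, 1], [0, 0, 2, 3], [1, 1, 0, 0]])
        = (pvPhiM pvPmatL) ^ iterations.toNat := by
      rw [pv_phiM_pow, pv_phiM_one, one_mul]; rfl
    funext i
    fin_cases i <;>
      · rw [← hRphi]
        simp only [pvPhiV, pvPhiM, Matrix.mulVec, dotProduct, Fin.sum_univ_four,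
          Matrix.of_apply, pv_range4, List.map, List.sum_cons, List.sum_nil,
          show List.take 4 (a :: b :: c :: d :: t) = [a, b, c, d] from rfl,
          List.getD, List.getElem?_cons_zero, List.getElem?_cons_succ,
          Option.getD_some, Fin.isValue, Fin.val_zero, Fin.val_one, Fin.val_two,
          show ((3 : Fin 4) : Nat) = 3 from rfl]
        rw [pv_castmod]; push_cast; ring

theorem pv_int_eq_of_zm (a b : Int) (ha : 0 ≤ a ∧ a < pvM) (hb : 0 ≤ b ∧ b < pvM)
    (h : (a : pvZM) = (b : pvZM)) : a = b := by
  rw [ZMod.intCast_eq_intCast_iff] at h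
  have h2 : a % ((4294967296 : ℕ) : ℤ) = b % ((4294967296 : ℕ) : ℤ) := h
  simp only [Nat.cast_ofNat] at h2
  have hm : (pvM : Int) = 4294967296 := rfl
  omega

-- ===== VERDICT (by name: the statement is the Claim_ definition above) =====
theorem pht_4x4_spec : Claim_equal_pht_4x4 := by
  intro data iterations _ hPre
  unfold Spec_pht_4x4
  by_cases hle : iterations ≤ 0
  · have h0 : iterations.toNat = 0 := by omega
    rw [pht_4x4, h0, pvLoopA, pht_4x4_alt, if_pos hle]
  · have hpos : 0 < iterations := by omega
    have hlen : 4 ≤ data.length := by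
      rcases hPre with h | h
      · omega
      · exact h
    obtain ⟨a, b, c, d, t, rfl⟩ : ∃ a b c d t, data = a :: b :: c :: d :: t := by
      match data, hlen with
      | a :: b :: c :: d :: t, _ => exact ⟨a, b, c, d, t, rfl⟩
    have hn : 1 ≤ iterations.toNat := by omega
    obtain ⟨r0, r1, r2, r3, hre, hrr, hrp⟩ := pv_loopA_char iterations.toNat a b c d t hn
    obtain ⟨o0, o1, o2, o3, hoe, hor, hop⟩ := pv_alt_char a b c d t iterations hpos
    rw [pht_4x4, hre, hoe]
    have hphi : pvPhiV [r0, r1, r2, r3] = pvPhiV [o0, o1, o2, o3] := by rw [hrp, hop]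
    have hcomp : ∀ i : Fin 4, ((([r0, r1, r2, r3] : List Int).getD i 0 : Int) : pvZM)
        = ((([o0, o1, o2, o3] : List Int).getD i 0 : Int) : pvZM) := by
      intro i
      exact congrFun hphi i
    have e0 := hcomp 0
    have e1 := hcomp 1
    have e2 := hcomp 2
    have e3 := hcomp 3
    simp only [List.getD, List.getElem?_cons_zero, List.getElem?_cons_succ,
      Option.getD_some, Fin.isValue, Fin.val_zero, Fin.val_one] at e0 e1 e2 e3
    have m := List.mem_cons_self (l := [r1, r2, r3]) (a := r0)
    rw [pv_int_eq_of_zm r0 o0 (hrr r0 (by simp)) (hor o0 (by simp)) e0,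
        pv_int_eq_of_zm r1 o1 (hrr r1 (by simp)) (hor o1 (by simp)) e1,
        pv_int_eq_of_zm r2 o2 (hrr r2 (by simp)) (hor o2 (by simp)) e2,
        pv_int_eq_of_zm r3 o3 (hrr r3 (by simp)) (hor o3 (by simp)) e3]
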